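-- pv_equiv track=rewrite | github.com/kingblessolivier/AfriMaster | PropApp/views.py | _detect_property_search
-- ===== SOURCE A (Python) =====
-- _RENT_KEYWORDS   = {'for rent', 'to rent', 'renting', 'rental', 'rent a', 'house to rent', 'place to rent', 'room to rent', 'rentals', 'monthly rent'}
--
-- _SALE_KEYWORDS   = {'for sale', 'to buy', 'buying', 'purchase', 'house to buy', 'invest', 'on sale', 'buy a', 'buy house', 'buy property', 'for purchase'}
--
-- _PROP_KEYWORDS   = {'house', 'apartment', 'flat', 'studio', 'duplex', 'villa', 'condo', 'property', 'properties', 'bedroom', 'unit', 'place', 'home', 'homes', 'listing', 'listings'}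
--
-- _SEARCH_TRIGGERS = {'show', 'find', 'search', 'list', 'available', 'looking for', 'need a', 'want a', 'get me', 'any', 'show me', 'view', 'see', 'display', 'browse', 'what is available', "what's available"}
--
-- _CHEAP_KEYWORDS  = {'cheap', 'affordable', 'low price', 'low-price', 'budget', 'inexpensive', 'cheapest', 'lowest', 'best price', 'economy', 'low cost', 'low rent'}
--
-- _LUXURY_KEYWORDS = {'luxury', 'premium', 'expensive', 'high-end', 'executive', 'posh', 'upscale', 'high end'}
--
-- def _detect_property_search(message):
--     """
--     Detect if the user is asking for property listings.
--     Returns (intent, sort) where intent is 'rent'|'sale'|'both'|None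
--     and sort is 'asc'|'desc'|'default'.
--     Requires a property keyword AND either a rent/sale/search keyword.
--     """
--     msg = message.lower()
--
--     has_prop    = any(k in msg for k in _PROP_KEYWORDS)
--     has_rent    = any(k in msg for k in _RENT_KEYWORDS)
--     has_sale    = any(k in msg for k in _SALE_KEYWORDS)
--     has_trigger = any(k in msg for k in _SEARCH_TRIGGERS)
--     has_cheap   = any(k in msg for k in _CHEAP_KEYWORDS)
--     has_luxury  = any(k in msg for k in _LUXURY_KEYWORDS)
--
--     # Must have a property keyword, and at least a search/rent/sale/cheap signal
--     if not has_prop: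
--         return None, 'default'
--     if not (has_rent or has_sale or has_trigger or has_cheap or has_luxury):
--         return None, 'default'
--
--     if has_rent and not has_sale:
--         intent = 'rent'
--     elif has_sale and not has_rent:
--         intent = 'sale'
--     else:
--         intent = 'both'
--
--     sort = 'asc' if has_cheap else ('desc' if has_luxury else 'default')
--     return intent, sort
-- ===== SOURCE B (Python) =====
-- _RENT_KW    = ('for rent', 'to rent', 'renting', 'rental', 'rent a', 'house to rent',
--                'place to rent', 'room to rent', 'rentals', 'monthly rent')
-- _SALE_KW    = ('for sale', 'to buy', 'buying', 'purchase', 'house to buy', 'invest',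
--                'on sale', 'buy a', 'buy house', 'buy property', 'for purchase')
-- _PROP_KW    = ('house', 'apartment', 'flat', 'studio', 'duplex', 'villa', 'condo',
--                'property', 'properties', 'bedroom', 'unit', 'place', 'home', 'homes',
--                'listing', 'listings')
-- _TRIGGER_KW = ('show', 'find', 'search', 'list', 'available', 'looking for', 'need a',
--                'want a', 'get me', 'any', 'show me', 'view', 'see', 'display',
--                'browse', 'what is available', "what's available")
-- _CHEAP_KW   = ('cheap', 'affordable', 'low price', 'low-price', 'budget', 'inexpensive',
--                'cheapest', 'lowest', 'best price', 'economy', 'low cost', 'low rent')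
-- _LUXURY_KW  = ('luxury', 'premium', 'expensive', 'high-end', 'executive', 'posh',
--                'upscale', 'high end')
--
--
-- def _detect_property_search(message):
--     """Position-driven multi-pattern scan: one left-to-right pass over the
--     message; at each index test which keyword groups *begin* there
--     (str.startswith with a tuple and an offset), accumulating six flags.
--     No per-keyword substring search over the whole text."""
--     msg = message.lower()
--
--     has_rent = has_sale = has_prop = has_trigger = has_cheap = has_luxury = False
--     for i in range(len(msg)):
--         has_rent    = has_rent    or msg.startswith(_RENT_KW, i)
--         has_sale    = has_sale    or msg.startswith(_SALE_KW, i)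
--         has_prop    = has_prop    or msg.startswith(_PROP_KW, i)
--         has_trigger = has_trigger or msg.startswith(_TRIGGER_KW, i)
--         has_cheap   = has_cheap   or msg.startswith(_CHEAP_KW, i)
--         has_luxury  = has_luxury  or msg.startswith(_LUXURY_KW, i)
--
--     if not has_prop:
--         return None, 'default'
--     if not (has_rent or has_sale or has_trigger or has_cheap or has_luxury):
--         return None, 'default'
--
--     if has_rent and not has_sale:
--         intent = 'rent'
--     elif has_sale and not has_rent:
--         intent = 'sale'
--     else:
--         intent = 'both'
--
--     sort = 'asc' if has_cheap else ('desc' if has_luxury else 'default')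
--     return intent, sort
-- ===== Notes on version B (the rewrite author's own statement) =====
-- stated objective: alternative
-- what changed: Replaces six per-keyword any(k in msg) substring searches by a position-driven multi-pattern scan: one left-to-right pass over the message that tests at each index which keyword groups begin there (str.startswith with a tuple and an offset), accumulating six flags; the branch logic then reads those flags.
import Mathlib
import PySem

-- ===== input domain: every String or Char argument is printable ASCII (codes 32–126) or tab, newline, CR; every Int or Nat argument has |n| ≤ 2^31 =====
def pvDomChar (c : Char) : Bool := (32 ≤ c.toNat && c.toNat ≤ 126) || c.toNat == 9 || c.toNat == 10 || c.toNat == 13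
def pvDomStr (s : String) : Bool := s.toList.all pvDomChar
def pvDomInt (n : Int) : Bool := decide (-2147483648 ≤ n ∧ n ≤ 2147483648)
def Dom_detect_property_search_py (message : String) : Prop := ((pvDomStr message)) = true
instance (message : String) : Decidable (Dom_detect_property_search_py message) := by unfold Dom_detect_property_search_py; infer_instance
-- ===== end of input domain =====

-- B replaces A's six per-keyword substring searches by one position-driven scan of the message
-- (at each index, test which keyword groups start there); objective: alternative, same cost.


-- ===== PORT A =====
-- A's keyword sets, ported as lists in source order (A only asks substring membership, order-independent).
def pvRentKw : List String := ["for rent", "to rent", "renting", "rental", "rent a", "house to rent", "place to rent", "room to rent", "rentals", "monthly rent"]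
def pvSaleKw : List String := ["for sale", "to buy", "buying", "purchase", "house to buy", "invest", "on sale", "buy a", "buy house", "buy property", "for purchase"]
def pvPropKw : List String := ["house", "apartment", "flat", "studio", "duplex", "villa", "condo", "property", "properties", "bedroom", "unit", "place", "home", "homes", "listing", "listings"]
def pvTriggerKw : List String := ["show", "find", "search", "list", "available", "looking for", "need a", "want a", "get me", "any", "show me", "view", "see", "display", "browse", "what is available", "what's available"]
def pvCheapKw : List String := ["cheap", "affordable", "low price", "low-price", "budget", "inexpensive", "cheapest", "lowest", "best price", "economy", "low cost", "low rent"]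
def pvLuxuryKw : List String := ["luxury", "premium", "expensive", "high-end", "executive", "posh", "upscale", "high end"]

def detect_property_search_py (message : String) : Option String × String :=
  let msg := PySem.Str.lower message
  let has_prop := pvPropKw.any (fun k => PySem.Str.isIn k msg)
  let has_rent := pvRentKw.any (fun k => PySem.Str.isIn k msg)
  let has_sale := pvSaleKw.any (fun k => PySem.Str.isIn k msg)
  let has_trigger := pvTriggerKw.any (fun k => PySem.Str.isIn k msg)
  let has_cheap := pvCheapKw.any (fun k => PySem.Str.isIn k msg)
  let has_luxury := pvLuxuryKw.any (fun k => PySem.Str.isIn k msg)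
  if !has_prop then (none, "default")
  else if !(has_rent || has_sale || has_trigger || has_cheap || has_luxury) then (none, "default")
  else
    let intent := if has_rent && !has_sale then "rent"
      else if has_sale && !has_rent then "sale"
      else "both"
    let sort := if has_cheap then "asc" else if has_luxury then "desc" else "default"
    (some intent, sort)

-- ===== PORT B =====
-- msg.startswith(kws_tuple, i): does any keyword of the group start at position i?
-- (exact for 0 ≤ i ≤ len: Python's startswith-with-offset is prefix-of-the-drop)
def pvStartsAny (kws : List String) (t : List Char) : Bool :=
  kws.any (fun k => k.toList.isPrefixOf t)

def detect_property_search_py_alt (message : String) : Option String × String :=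
  let msg := PySem.Str.lower message
  let cs := msg.toList
  -- for i in range(len(msg)): flag = flag or msg.startswith(group, i)   (six flags, one pass)
  let st := (List.range cs.length).foldl
    (fun st i =>
      (st.1 || pvStartsAny pvRentKw (cs.drop i),
       st.2.1 || pvStartsAny pvSaleKw (cs.drop i),
       st.2.2.1 || pvStartsAny pvPropKw (cs.drop i),
       st.2.2.2.1 || pvStartsAny pvTriggerKw (cs.drop i),
       st.2.2.2.2.1 || pvStartsAny pvCheapKw (cs.drop i),
       st.2.2.2.2.2 || pvStartsAny pvLuxuryKw (cs.drop i)))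
    ((false, false, false, false, false, false) : Bool × Bool × Bool × Bool × Bool × Bool)
  let has_rent := st.1
  let has_sale := st.2.1
  let has_prop := st.2.2.1
  let has_trigger := st.2.2.2.1
  let has_cheap := st.2.2.2.2.1
  let has_luxury := st.2.2.2.2.2
  if !has_prop then (none, "default")
  else if !(has_rent || has_sale || has_trigger || has_cheap || has_luxury) then (none, "default")
  else
    let intent := if has_rent && !has_sale then "rent"
      else if has_sale && !has_rent then "sale"
      else "both"
    let sort := if has_cheap then "asc" else if has_luxury then "desc" else "default"
    (some intent, sort)

-- ===== PRECONDITION & SPEC =====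
def Spec_detect_property_search_py (message : String) (out : Option String × String) : Prop := out = detect_property_search_py_alt message
instance (message : String) (out : Option String × String) : Decidable (Spec_detect_property_search_py message out) := by unfold Spec_detect_property_search_py; infer_instance

-- ===== CLAIM (what is proved, stated in full; the proofs are below) =====
def Claim_equal_detect_property_search_py : Prop := ∀ (message : String), Dom_detect_property_search_py message → Spec_detect_property_search_py message (detect_property_search_py message)

-- ===== LEMMAS AND PROOFS =====

-- the six-flag or-accumulating fold, split into six independent `any`s
theorem pv_foldl_or6 (f1 f2 f3 f4 f5 f6 : Nat → Bool) (l : List Nat)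
    (b1 b2 b3 b4 b5 b6 : Bool) :
    l.foldl (fun st i =>
        (st.1 || f1 i, st.2.1 || f2 i, st.2.2.1 || f3 i,
         st.2.2.2.1 || f4 i, st.2.2.2.2.1 || f5 i, st.2.2.2.2.2 || f6 i))
      (b1, b2, b3, b4, b5, b6)
    = (b1 || l.any f1, b2 || l.any f2, b3 || l.any f3,
       b4 || l.any f4, b5 || l.any f5, b6 || l.any f6) := by
  induction l generalizing b1 b2 b3 b4 b5 b6 with
  | nil => simp
  | cons hd tl ih => simp [ih, Bool.or_assoc]

-- one group: "some keyword of the group starts at some position" = "some keyword is a substring"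
theorem pv_scan_eq_isIn (kws : List String) (h : ∀ k ∈ kws, k.toList ≠ []) (s : String) :
    (List.range s.toList.length).any (fun i => pvStartsAny kws (s.toList.drop i))
      = kws.any (fun k => PySem.Str.isIn k s) := by
  rw [Bool.eq_iff_iff]
  simp only [List.any_eq_true, List.mem_range, pvStartsAny, List.isPrefixOf_iff_prefix]
  constructor
  · rintro ⟨i, _, k, hk, hp⟩
    refine ⟨k, hk, (PySem.Str.isIn_iff_infix k s).mpr ?_⟩
    exact (PySem.Chars.isIn_iff_infix _ _).mp
      ((PySem.Chars.exists_prefix_drop_iff_isIn k.toList s.toList).mp ⟨i, hp⟩)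
  · rintro ⟨k, hk, hin⟩
    obtain ⟨j, hp⟩ := (PySem.Chars.exists_prefix_drop_iff_isIn k.toList s.toList).mpr
      ((PySem.Chars.isIn_iff_infix _ _).mpr ((PySem.Str.isIn_iff_infix k s).mp hin))
    refine ⟨j, ?_, k, hk, hp⟩
    by_contra hj
    have hnil : s.toList.drop j = [] := List.drop_eq_nil_of_le (by omega)
    rw [hnil, List.prefix_nil] at hp
    exact h k hk hp

-- ===== VERDICT (by name: the statement is the Claim_ definition above) =====
theorem detect_property_search_py_spec : Claim_equal_detect_property_search_py := by
  intro message _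
  unfold Spec_detect_property_search_py detect_property_search_py detect_property_search_py_alt
  simp only [pv_foldl_or6, Bool.false_or,
    pv_scan_eq_isIn pvRentKw (by decide), pv_scan_eq_isIn pvSaleKw (by decide),
    pv_scan_eq_isIn pvPropKw (by decide), pv_scan_eq_isIn pvTriggerKw (by decide),
    pv_scan_eq_isIn pvCheapKw (by decide), pv_scan_eq_isIn pvLuxuryKw (by decide)]
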